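-- pv_equiv track=rewrite | github.com/ValleyC/feasibility-diffusion | problems/cvrp/data.py | solution_to_edges
-- ===== SOURCE A (Python) =====
-- from typing import List, Tuple
--
-- def solution_to_edges(routes: List[List[int]], depot: int = 0) -> List[Tuple[int, int]]:
--     """Convert CVRP solution to edge list for GNN.
--
--     Each route depot→c1→c2→...→ck→depot produces edges:
--     (depot, c1), (c1, c2), ..., (ck, depot)
--     """
--     edges = []
--     for route in routes:
--         if len(route) == 0:
--             continue
--         edges.append((depot, route[0]))
--         for k in range(len(route) - 1):
--             edges.append((route[k], route[k + 1]))
--         edges.append((route[-1], depot))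
--     return edges
-- ===== SOURCE B (Python) =====
-- from typing import List, Tuple
--
-- def solution_to_edges(routes: List[List[int]], depot: int = 0) -> List[Tuple[int, int]]:
--     """Convert CVRP solution to edge list for GNN.
--
--     Staged: drop empty routes, flatten everything into ONE global node
--     sequence depot, r1..., depot, r2..., depot (one shared depot between
--     consecutive routes), then take consecutive pairs of that single sequence.
--     """
--     seq = [depot]
--     for route in routes:
--         if route:
--             seq += route
--             seq.append(depot)
--     return list(zip(seq, seq[1:]))
-- ===== Notes on version B (the rewrite author's own statement) =====
-- stated objective: alternative
-- what changed: Instead of appending edges route by route (first edge, interior index loop, last edge), B first builds one global node sequence depot,r1...,depot,r2...,depot with empty routes skipped, and derives all edges at once as the consecutive pairs of that single sequence.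
import Mathlib
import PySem

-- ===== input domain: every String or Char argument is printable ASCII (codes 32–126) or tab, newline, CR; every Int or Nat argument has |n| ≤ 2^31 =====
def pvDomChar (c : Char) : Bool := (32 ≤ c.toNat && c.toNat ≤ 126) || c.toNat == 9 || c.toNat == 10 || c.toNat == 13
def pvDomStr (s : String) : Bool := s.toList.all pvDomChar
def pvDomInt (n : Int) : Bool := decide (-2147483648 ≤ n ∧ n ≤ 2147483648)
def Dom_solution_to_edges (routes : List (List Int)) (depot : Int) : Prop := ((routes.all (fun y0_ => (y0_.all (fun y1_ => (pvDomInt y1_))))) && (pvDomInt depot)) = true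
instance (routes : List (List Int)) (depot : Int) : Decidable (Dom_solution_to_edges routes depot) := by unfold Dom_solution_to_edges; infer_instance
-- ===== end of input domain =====

-- B builds one global node sequence depot,r1...,depot,r2...,depot (empty routes skipped) and takes its consecutive pairs, instead of A's per-route edge appends (alternative decomposition; same cost).

-- ===== PORT A =====
def solution_to_edges (routes : List (List Int)) (depot : Int) : List (Int × Int) :=
  routes.foldl (fun edges route =>
    if route.length == 0 then edges
    else
      ((PySem.List.pyRange 0 ((route.length : Int) - 1) 1).foldl
          (fun e k => e ++ [(PySem.List.pyGetD route k 0, PySem.List.pyGetD route (k + 1) 0)])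
          (edges ++ [(depot, PySem.List.pyGetD route 0 0)]))
        ++ [(PySem.List.pyGetD route (-1) 0, depot)]) []

-- ===== PORT B =====
-- seq += route; seq.append(depot) → s ++ route ++ [depot];  zip(seq, seq[1:]) → seq.zip (seq.drop 1)
def solution_to_edges_alt (routes : List (List Int)) (depot : Int) : List (Int × Int) :=
  let seq := routes.foldl (fun s route => if route = [] then s else s ++ route ++ [depot]) [depot]
  seq.zip (seq.drop 1)

-- ===== PRECONDITION & SPEC =====
def Spec_solution_to_edges (routes : List (List Int)) (depot : Int) (out : List (Int × Int)) : Prop := out = solution_to_edges_alt routes depot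
instance (routes : List (List Int)) (depot : Int) (out : List (Int × Int)) : Decidable (Spec_solution_to_edges routes depot out) := by unfold Spec_solution_to_edges; infer_instance

-- ===== CLAIM (what is proved, stated in full; the proofs are below) =====
def Claim_equal_solution_to_edges : Prop := ∀ (routes : List (List Int)) (depot : Int), Dom_solution_to_edges routes depot → Spec_solution_to_edges routes depot (solution_to_edges routes depot)

-- ===== LEMMAS AND PROOFS =====

-- consecutive pairs of a list
def pvPairs (l : List Int) : List (Int × Int) := l.zip (l.drop 1)

-- A's three pieces for the nonempty route a :: rs (interior written as a map over indices)
-- coincide with the consecutive-pair zip of the depot-padded path.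
theorem pv_key : ∀ (rs : List Int) (a x d : Int),
    (x, a) :: (List.map (fun k => ((a :: rs).getD k 0, (a :: rs).getD (k+1) 0)) (List.range rs.length) ++ [(rs.getLastD a, d)])
      = List.zip (x :: ((a :: rs) ++ [d])) ((a :: rs) ++ [d]) := by
  intro rs
  induction rs with
  | nil => intro a x d; rfl
  | cons b rs' ih =>
    intro a x d
    have h := ih b a d
    rw [List.cons_append] at h
    rw [List.cons_append, List.cons_append, List.zip_cons_cons, ← h]
    rw [List.length_cons, List.range_succ_eq_map, List.map_cons, List.map_map, List.cons_append]
    have hm : List.map ((fun k => ((a :: b :: rs').getD k 0, (a :: b :: rs').getD (k+1) 0)) ∘ Nat.succ) (List.range rs'.length)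
        = List.map (fun k => ((b :: rs').getD k 0, (b :: rs').getD (k+1) 0)) (List.range rs'.length) :=
      List.map_congr_left (fun k _ => rfl)
    rw [hm, List.getLastD_cons]
    rfl

-- A's per-route step for a route appends exactly the consecutive pairs of [depot] ++ route ++ [depot].
theorem pv_step (edges : List (Int × Int)) (route : List Int) (depot : Int) :
    (if route.length == 0 then edges
     else
       ((PySem.List.pyRange 0 ((route.length : Int) - 1) 1).foldl
           (fun e k => e ++ [(PySem.List.pyGetD route k 0, PySem.List.pyGetD route (k + 1) 0)])
           (edges ++ [(depot, PySem.List.pyGetD route 0 0)]))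
         ++ [(PySem.List.pyGetD route (-1) 0, depot)])
    = (if route = [] then edges
       else edges ++ pvPairs ([depot] ++ route ++ [depot])) := by
  cases route with
  | nil => rfl
  | cons a rs =>
    have hne : a :: rs ≠ [] := List.cons_ne_nil a rs
    rw [if_neg (by simp : ¬ (((a :: rs).length == 0) = true)), if_neg hne]
    rw [PySem.List.foldl_append_singleton_eq_map, PySem.List.pyRange_one, List.map_map]
    have hlen : ((((a :: rs).length : Int) - 1) - 0).toNat = rs.length := by
      simp only [List.length_cons, Int.sub_zero]; push_cast; omega
    rw [hlen]
    have hmap : List.map ((fun k => (PySem.List.pyGetD (a :: rs) k 0, PySem.List.pyGetD (a :: rs) (k + 1) 0)) ∘ (fun k : ℕ => (0:Int) + ↑k)) (List.range rs.length)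
        = List.map (fun k => ((a :: rs).getD k 0, (a :: rs).getD (k+1) 0)) (List.range rs.length) := by
      refine List.map_congr_left (fun k _ => ?_)
      show (PySem.List.pyGetD (a :: rs) ((0:Int) + ↑k) 0, PySem.List.pyGetD (a :: rs) ((0:Int) + ↑k + 1) 0) = _
      rw [zero_add]
      have hk1 : ((k : Int) + 1) = ((k + 1 : ℕ) : Int) := by push_cast; ring
      rw [hk1, PySem.List.pyGetD_natCast, PySem.List.pyGetD_natCast]
    rw [hmap]
    have h0 : PySem.List.pyGetD (a :: rs) 0 0 = a := by
      simp [PySem.List.pyGetD_zero]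
    have hneg : PySem.List.pyGetD (a :: rs) (-1) 0 = rs.getLastD a := by
      rw [PySem.List.pyGetD_neg_one (a :: rs) 0 hne, List.getLast_eq_getLastD]
    rw [h0, hneg]
    unfold pvPairs
    rw [List.singleton_append, List.cons_append, List.drop_one, List.tail_cons]
    rw [← pv_key rs a depot depot]
    simp [List.append_assoc]

-- splitting consecutive pairs at a cut point: if s ends with d, pairs (s ++ t) = pairs s ++ pairs (d :: t)
theorem pv_pairs_append : ∀ (s : List Int) (t : List Int) (d : Int) (h : s ≠ []),
    s.getLast h = d → pvPairs (s ++ t) = pvPairs s ++ pvPairs (d :: t) := by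
  intro s
  induction s with
  | nil => intro t d h; exact absurd rfl h
  | cons a s' ih =>
    intro t d h hlast
    cases s' with
    | nil =>
      simp only [List.getLast_singleton] at hlast
      subst hlast
      simp [pvPairs]
    | cons b s'' =>
      have hlast' : (b :: s'').getLast (List.cons_ne_nil b s'') = d := by
        rw [← hlast]; exact (List.getLast_cons (List.cons_ne_nil b s'')).symm
      have h' := ih t d (List.cons_ne_nil b s'') hlast'
      simp only [pvPairs, List.cons_append, List.drop_one, List.tail_cons, List.zip_cons_cons] at h' ⊢
      rw [h']

-- main invariant: A's fold starting from the pairs of seq equals the pairs of B's extended seq,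
-- for any seq that is nonempty and ends with the depot.
theorem pv_main : ∀ (routes : List (List Int)) (depot : Int) (seq : List Int) (h : seq ≠ []),
    seq.getLast h = depot →
    routes.foldl (fun edges route =>
      if route.length == 0 then edges
      else
        ((PySem.List.pyRange 0 ((route.length : Int) - 1) 1).foldl
            (fun e k => e ++ [(PySem.List.pyGetD route k 0, PySem.List.pyGetD route (k + 1) 0)])
            (edges ++ [(depot, PySem.List.pyGetD route 0 0)]))
          ++ [(PySem.List.pyGetD route (-1) 0, depot)]) (pvPairs seq)
    = pvPairs (routes.foldl (fun s route => if route = [] then s else s ++ route ++ [depot]) seq) := by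
  intro routes
  induction routes with
  | nil => intro depot seq h hlast; rfl
  | cons r rest ih =>
    intro depot seq h hlast
    rw [List.foldl_cons, List.foldl_cons, pv_step]
    by_cases hr : r = []
    · rw [if_pos hr, if_pos hr]; exact ih depot seq h hlast
    · rw [if_neg hr, if_neg hr]
      have hcut : pvPairs seq ++ pvPairs ([depot] ++ r ++ [depot]) = pvPairs (seq ++ r ++ [depot]) := by
        rw [List.append_assoc, List.singleton_append, ← pv_pairs_append seq (r ++ [depot]) depot h hlast]
        simp [List.append_assoc]
      rw [hcut]
      have hne' : seq ++ r ++ [depot] ≠ [] := by simp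
      have hlast' : (seq ++ r ++ [depot]).getLast hne' = depot := by
        simp
      exact ih depot (seq ++ r ++ [depot]) hne' hlast'

-- ===== VERDICT (by name: the statement is the Claim_ definition above) =====
theorem solution_to_edges_spec : Claim_equal_solution_to_edges := by
  intro routes depot _
  unfold Spec_solution_to_edges solution_to_edges solution_to_edges_alt
  have h := pv_main routes depot [depot] (List.cons_ne_nil depot []) (by simp)
  simpa [pvPairs] using h
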